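-- pv_equiv track=rewrite | github.com/ConnorValerio/SudokuSolver | board.py | get_min_bound
-- ===== SOURCE A (Python) =====
-- def get_min_bound(val):
--     min_bound = val
--
--     if(min_bound % 3 == 0):
--         min_bound -= 3
--     else:
--         while(min_bound % 3 != 0):
--             min_bound -= 1
--
--     return min_bound
-- ===== SOURCE B (Python) =====
-- def get_min_bound(val):
--     return val - (val % 3 or 3)
-- ===== Notes on version B (the rewrite author's own statement) =====
-- stated objective: simpler
-- what changed: Replaces the branch plus decrement-until-divisible loop with the single closed-form expression val - (val % 3 or 3).
import Mathlib
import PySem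

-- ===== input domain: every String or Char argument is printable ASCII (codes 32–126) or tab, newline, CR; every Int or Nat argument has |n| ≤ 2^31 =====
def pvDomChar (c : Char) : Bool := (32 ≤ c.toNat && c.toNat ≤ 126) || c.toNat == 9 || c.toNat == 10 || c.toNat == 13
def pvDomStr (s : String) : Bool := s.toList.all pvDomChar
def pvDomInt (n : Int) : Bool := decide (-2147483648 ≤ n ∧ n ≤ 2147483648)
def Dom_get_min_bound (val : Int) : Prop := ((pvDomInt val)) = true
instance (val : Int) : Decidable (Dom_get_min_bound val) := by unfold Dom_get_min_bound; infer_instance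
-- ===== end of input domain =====

-- B replaces A's branch-and-decrement loop with the closed form val - (val % 3 or 3); objective: simpler.


-- ===== PORT A =====
-- the 'while(min_bound % 3 != 0): min_bound -= 1' loop
def pvWhileA (m : Int) : Int :=
  if PySem.Int.mod m 3 ≠ 0 then pvWhileA (m - 1) else m
termination_by (PySem.Int.mod m 3).toNat
decreasing_by
  simp only [PySem.Int.mod_eq_emod_of_pos (a := m) (by omega : (0:Int) < 3),
    PySem.Int.mod_eq_emod_of_pos (a := m - 1) (by omega : (0:Int) < 3)] at *
  omega

def get_min_bound (val : Int) : Int :=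
  if PySem.Int.mod val 3 = 0 then val - 3
  else pvWhileA val

-- ===== PORT B =====
def get_min_bound_alt (val : Int) : Int :=
  val - (if PySem.Int.mod val 3 = 0 then 3 else PySem.Int.mod val 3)

-- ===== PRECONDITION & SPEC =====
def Spec_get_min_bound (val : Int) (out : Int) : Prop := out = get_min_bound_alt val
instance (val : Int) (out : Int) : Decidable (Spec_get_min_bound val out) := by unfold Spec_get_min_bound; infer_instance

-- ===== CLAIM (what is proved, stated in full; the proofs are below) =====
def Claim_equal_get_min_bound : Prop := ∀ (val : Int), Dom_get_min_bound val → Spec_get_min_bound val (get_min_bound val)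

-- ===== LEMMAS AND PROOFS =====
theorem pvWhileA_eq (m : Int) : pvWhileA m = m - PySem.Int.mod m 3 := by
  induction m using pvWhileA.induct with
  | case1 m h ih =>
    rw [pvWhileA, if_pos h, ih]
    simp only [PySem.Int.mod_eq_emod_of_pos (a := m) (by omega : (0:Int) < 3),
      PySem.Int.mod_eq_emod_of_pos (a := m - 1) (by omega : (0:Int) < 3)] at *
    omega
  | case2 m h =>
    rw [pvWhileA, if_neg h]
    simp only [ne_eq, not_not] at h
    omega

-- ===== VERDICT (by name: the statement is the Claim_ definition above) =====
theorem get_min_bound_spec : Claim_equal_get_min_bound := by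
  intro val _
  unfold Spec_get_min_bound get_min_bound get_min_bound_alt
  split_ifs with h
  · rfl
  · rw [pvWhileA_eq]
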